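-- pv_equiv track=rewrite | github.com/osirislab/CSAW-CTF-2018-Quals | forensics/mcgriddle/challenge_part/solver.py | mask_from_board
-- ===== SOURCE A (Python) =====
-- def mask_from_board(board):
--     cleaned = board.replace(' ', '')
--     separated = [list(x) for x in cleaned.split('\n')]
--     valids = []
--     for row in range(len(separated)):
--         for col in range(len(separated[row])):
--             if separated[row][col] == '.':
--                 valids.append((row,col))
--     return valids
-- ===== SOURCE B (Python) =====
-- def mask_from_board(board):
--     cleaned = board.replace(' ', '')
--     valids = []
--     row = 0
--     col = 0
--     for ch in cleaned:
--         if ch == '\n':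
--             row += 1
--             col = 0
--         else:
--             if ch == '.':
--                 valids.append((row, col))
--             col += 1
--     return valids
-- ===== Notes on version B (the rewrite author's own statement) =====
-- stated objective: simpler
-- what changed: Replaced the split-into-rows grid plus nested index loops with a single stateful pass over the cleaned string that tracks (row, col) and resets col at each newline, never materializing the list-of-lists.
import Mathlib
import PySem

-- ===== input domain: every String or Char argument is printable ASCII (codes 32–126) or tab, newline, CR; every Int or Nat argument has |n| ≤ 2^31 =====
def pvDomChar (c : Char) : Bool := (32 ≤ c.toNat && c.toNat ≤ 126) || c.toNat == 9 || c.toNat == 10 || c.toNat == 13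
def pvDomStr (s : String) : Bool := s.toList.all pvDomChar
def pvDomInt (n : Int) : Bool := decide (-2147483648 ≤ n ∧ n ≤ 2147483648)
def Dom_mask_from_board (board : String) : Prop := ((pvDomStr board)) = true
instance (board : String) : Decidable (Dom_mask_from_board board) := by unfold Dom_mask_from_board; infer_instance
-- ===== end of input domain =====

-- B collects the same '.' coordinates in ONE pass over the cleaned string (row/col counters) instead of
-- A's split-into-rows grid with nested index loops; objective: simpler.

-- ===== PORT A =====
def mask_from_board (board : String) : List (Int × Int) :=
  let cleaned := PySem.Str.replace board " " ""
  let separated := (PySem.Chars.splitOn cleaned.toList ['\n']).map (fun x => x)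
  (PySem.List.pyRange 0 (separated.length : Int) 1).foldl (fun valids row =>
    (PySem.List.pyRange 0 ((PySem.List.pyGetD separated row []).length : Int) 1).foldl (fun valids col =>
      if PySem.List.pyGetD (PySem.List.pyGetD separated row []) col ' ' = '.' then
        valids ++ [(row, col)]
      else valids) valids) []

-- ===== PORT B =====
def mask_from_board_alt (board : String) : List (Int × Int) :=
  let cleaned := PySem.Str.replace board " " ""
  (cleaned.toList.foldl (fun (st : Int × Int × List (Int × Int)) ch =>
      if ch = '\n' then (st.1 + 1, 0, st.2.2)
      else if ch = '.' then (st.1, st.2.1 + 1, st.2.2 ++ [(st.1, st.2.1)])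
      else (st.1, st.2.1 + 1, st.2.2)) ((0 : Int), (0 : Int), ([] : List (Int × Int)))).2.2

-- ===== PRECONDITION & SPEC =====
def Spec_mask_from_board (board : String) (out : List (Int × Int)) : Prop := out = mask_from_board_alt board
instance (board : String) (out : List (Int × Int)) : Decidable (Spec_mask_from_board board out) := by unfold Spec_mask_from_board; infer_instance

-- ===== CLAIM (what is proved, stated in full; the proofs are below) =====
def Claim_equal_mask_from_board : Prop := ∀ (board : String), Dom_mask_from_board board → Spec_mask_from_board board (mask_from_board board)

-- ===== LEMMAS AND PROOFS =====

-- first row / remaining rows of splitting a char list at a separator character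
def pvSplit (c : Char) : List Char → List Char × List (List Char)
  | [] => ([], [])
  | x :: xs =>
    let r := pvSplit c xs
    if x = c then ([], r.1 :: r.2) else (x :: r.1, r.2)

-- '.'-positions of one row, first column = col
def pvRowPts (row : Int) (col : Int) : List Char → List (Int × Int)
  | [] => []
  | c :: t => if c = '.' then (row, col) :: pvRowPts row (col + 1) t else pvRowPts row (col + 1) t

-- '.'-positions of a list of rows, first row index = row
def pvGridPts (row : Int) : List (List Char) → List (Int × Int)
  | [] => []
  | r :: rs => pvRowPts row 0 r ++ pvGridPts (row + 1) rs

theorem pvSplitOn_go_eq (c : Char) : ∀ (fuel : Nat) (l cur : List Char) (acc : List (List Char)),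
    l.length ≤ fuel →
    PySem.Chars.splitOn.go [c] fuel l cur acc =
      acc.reverse ++ (cur.reverse ++ (pvSplit c l).1) :: (pvSplit c l).2 := by
  intro fuel
  induction fuel with
  | zero =>
    intro l cur acc h
    have : l = [] := List.eq_nil_of_length_eq_zero (Nat.le_zero.mp h)
    subst this
    simp [PySem.Chars.splitOn.go, pvSplit]
  | succ n ih =>
    intro l cur acc h
    cases l with
    | nil => simp [PySem.Chars.splitOn.go, pvSplit]
    | cons x rest =>
      by_cases hx : x = c
      · subst hx
        have hpre : List.isPrefixOf [x] (x :: rest) = true := by simp [List.isPrefixOf]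
        rw [PySem.Chars.splitOn.go, if_pos hpre]
        simp only [List.length_cons] at h
        simp only [show ([x] : List Char).length = 1 from rfl, List.drop_succ_cons, List.drop_zero]
        rw [ih _ _ _ (by omega)]
        simp [pvSplit]
      · have hpre : List.isPrefixOf [c] (x :: rest) = false := by
          simp [List.isPrefixOf]
          exact fun hcx => absurd hcx.symm hx
        rw [PySem.Chars.splitOn.go, if_neg (by simp [hpre])]
        simp only [List.length_cons] at h
        rw [ih _ _ _ (by omega)]
        simp [pvSplit, hx]

theorem pvSplitOn_eq (c : Char) (l : List Char) :
    PySem.Chars.splitOn l [c] = (pvSplit c l).1 :: (pvSplit c l).2 := by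
  rw [PySem.Chars.splitOn, pvSplitOn_go_eq c (l.length + 1) l [] [] (by omega)]
  simp

theorem pvInner_eq (row : Int) : ∀ (r : List Char) (s : Int) (acc : List (Int × Int)),
    (PySem.List.enumerate r s).foldl
      (fun acc p => if p.2 = '.' then acc ++ [(row, p.1)] else acc) acc
      = acc ++ pvRowPts row s r := by
  intro r
  induction r with
  | nil => intro s acc; simp [PySem.List.enumerate_nil, pvRowPts]
  | cons x t ih =>
    intro s acc
    rw [PySem.List.enumerate_cons]
    simp only [List.foldl_cons]
    by_cases hx : x = '.'
    · simp only [hx, ih]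
      simp [pvRowPts]
    · simp only [if_neg hx, ih]
      simp [pvRowPts, hx]

theorem pvOuter_eq : ∀ (rows : List (List Char)) (s : Int) (acc : List (Int × Int)),
    (PySem.List.enumerate rows s).foldl
      (fun acc p =>
        (PySem.List.enumerate p.2 0).foldl
          (fun acc q => if q.2 = '.' then acc ++ [(p.1, q.1)] else acc) acc) acc
      = acc ++ pvGridPts s rows := by
  intro rows
  induction rows with
  | nil => intro s acc; simp [PySem.List.enumerate_nil, pvGridPts]
  | cons r rs ih =>
    intro s acc
    rw [PySem.List.enumerate_cons]
    simp only [List.foldl_cons]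
    rw [pvInner_eq, ih]
    simp [pvGridPts]

theorem pvA_eq (board : String) :
    mask_from_board board
      = pvGridPts 0 ((pvSplit '\n' (PySem.Str.replace board " " "").toList).1
            :: (pvSplit '\n' (PySem.Str.replace board " " "").toList).2) := by
  unfold mask_from_board
  simp only [List.map_id']
  rw [← pvSplitOn_eq]
  generalize PySem.Chars.splitOn (PySem.Str.replace board " " "").toList ['\n'] = rows
  have houter : PySem.List.enumerate rows 0
      = (PySem.List.pyRange 0 (rows.length : Int) 1).map
          (fun j => (j, PySem.List.pyGetD rows j [])) := by
    simpa using PySem.List.enumerate_eq_map_pyRange rows ([] : List Char)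
  have hgoal := pvOuter_eq rows 0 []
  rw [houter, List.foldl_map] at hgoal
  simp only [List.nil_append] at hgoal
  rw [← hgoal]
  apply PySem.List.foldl_congr_mem
  intro acc j _
  have hinner : PySem.List.enumerate (PySem.List.pyGetD rows j []) 0
      = (PySem.List.pyRange 0 ((PySem.List.pyGetD rows j []).length : Int) 1).map
          (fun k => (k, PySem.List.pyGetD (PySem.List.pyGetD rows j []) k ' ')) := by
    simpa using PySem.List.enumerate_eq_map_pyRange (PySem.List.pyGetD rows j []) ' '
  rw [hinner, List.foldl_map]

theorem pvB_eq (cs : List Char) : ∀ (row col : Int) (acc : List (Int × Int)),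
    (cs.foldl (fun (st : Int × Int × List (Int × Int)) ch =>
      if ch = '\n' then (st.1 + 1, 0, st.2.2)
      else if ch = '.' then (st.1, st.2.1 + 1, st.2.2 ++ [(st.1, st.2.1)])
      else (st.1, st.2.1 + 1, st.2.2)) (row, col, acc)).2.2
      = acc ++ pvRowPts row col (pvSplit '\n' cs).1 ++ pvGridPts (row + 1) (pvSplit '\n' cs).2 := by
  induction cs with
  | nil => intro row col acc; simp [pvSplit, pvRowPts, pvGridPts]
  | cons x t ih =>
    intro row col acc
    simp only [List.foldl_cons]
    by_cases hn : x = '\n'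
    · rw [if_pos hn, ih]
      simp [pvSplit, hn, pvRowPts, pvGridPts, List.append_assoc]
    · by_cases hd : x = '.'
      · rw [if_neg hn, if_pos hd, ih]
        simp [pvSplit, hd, pvRowPts, List.append_assoc]
      · rw [if_neg hn, if_neg hd, ih]
        simp [pvSplit, hn, hd, pvRowPts]

-- ===== VERDICT (by name: the statement is the Claim_ definition above) =====
theorem mask_from_board_spec : Claim_equal_mask_from_board := by
  intro board _
  unfold Spec_mask_from_board
  rw [pvA_eq]
  unfold mask_from_board_alt
  rw [pvB_eq]
  simp [pvGridPts]
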